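-- pv_equiv track=rewrite | github.com/sarajaksa/anki-addons | edit-buttons.py | findSelectedText
-- ===== SOURCE A (Python) =====
-- def findSelectedText(html, selection):
--     if selection in html:
--         return selection
--     text = selection
--     foundMatch = False
--     while not foundMatch:
--         if text in html:
--             foundMatch = True
--         else:
--             text = text[:-1]
--     start = html.find(text)
--     foundMatch = False
--     text = selection
--     while not foundMatch:
--         if text in html:
--             foundMatch = True
--         else:
--             text = text[1:]
--     end = html.find(text) + len(text)
--     html = html[start:end]
--     return html
-- ===== SOURCE B (Python) =====
-- def _max_true(n, pred):
--     # largest m in [0, n] with pred(m) true, assuming pred is monotone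
--     # (pred(m) implies pred(m') for m' <= m) and pred(0) is true.
--     lo, hi = 0, n
--     while lo < hi:
--         mid = (lo + hi + 1) // 2
--         if pred(mid):
--             lo = mid
--         else:
--             hi = mid - 1
--     return lo
--
--
-- def findSelectedText(html, selection):
--     if selection in html:
--         return selection
--     n = len(selection)
--     k = _max_true(n, lambda m: selection[:m] in html)
--     j = _max_true(n, lambda m: selection[n - m:] in html)
--     start = html.find(selection[:k])
--     suffix = selection[n - j:]
--     end = html.find(suffix) + len(suffix)
--     return html[start:end]
-- ===== Notes on version B (the rewrite author's own statement) =====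
-- stated objective: faster
-- what changed: A shrinks the selection one character at a time from the right (then from the left) and re-tests membership each time; B binary-searches on the longest matching prefix/suffix length, exploiting that 'selection[:m] in html' is monotone in m, so only O(log m) membership tests are run per side.
import Mathlib
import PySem

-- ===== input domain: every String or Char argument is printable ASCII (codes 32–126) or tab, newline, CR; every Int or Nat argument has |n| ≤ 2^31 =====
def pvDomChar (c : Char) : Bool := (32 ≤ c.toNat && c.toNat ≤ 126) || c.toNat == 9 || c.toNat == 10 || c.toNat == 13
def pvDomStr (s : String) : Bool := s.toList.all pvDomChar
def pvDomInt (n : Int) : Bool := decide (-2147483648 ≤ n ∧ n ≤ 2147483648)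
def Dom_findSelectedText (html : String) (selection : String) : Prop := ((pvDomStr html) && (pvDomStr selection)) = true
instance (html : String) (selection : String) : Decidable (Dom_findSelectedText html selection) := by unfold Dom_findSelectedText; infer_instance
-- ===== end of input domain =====

-- B replaces A's two shrink-one-character-at-a-time scans by binary search on the prefix/suffix
-- length (the substring test is monotone in the length); objective: faster.

-- ===== PORT A =====
-- the two while loops of A (shrink from the right / from the left until `text in html`)
def aPrefixLoop (html : List Char) (text : List Char) : List Char :=
  if PySem.Chars.isIn text html then text
  else aPrefixLoop html text.dropLast
termination_by text.length
decreasing_by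
  have hne : text ≠ [] := by
    intro h; subst h; simp [PySem.Chars.isIn_nil] at *
  have := List.length_pos_iff.mpr hne
  simp [List.length_dropLast]; omega

def aSuffixLoop (html : List Char) (text : List Char) : List Char :=
  if PySem.Chars.isIn text html then text
  else aSuffixLoop html text.tail
termination_by text.length
decreasing_by
  have hne : text ≠ [] := by
    intro h; subst h; simp [PySem.Chars.isIn_nil] at *
  have := List.length_pos_iff.mpr hne
  simp [List.length_tail]; omega


def findSelectedText (html : String) (selection : String) : String :=
  let h := html.toList
  let s := selection.toList
  if PySem.Chars.isIn s h then selection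
  else
    let text₁ := aPrefixLoop h s
    let start := PySem.Chars.find h text₁
    let text₂ := aSuffixLoop h s
    let «end» := PySem.Chars.find h text₂ + (text₂.length : Int)
    String.ofList (PySem.List.slice h (some start) (some «end»))


-- ===== PORT B =====
-- _max_true of Source B: binary search for the largest m in [0, n] with pred m
def maxTrue (pred : Int → Bool) (lo hi : Int) : Int :=
  if lo < hi then
    let mid := PySem.Int.floordiv (lo + hi + 1) 2
    if pred mid then maxTrue pred mid hi
    else maxTrue pred lo (mid - 1)
  else lo
termination_by (hi - lo).toNat
decreasing_by
  · have h1 : lo + 1 ≤ PySem.Int.floordiv (lo + hi + 1) 2 := by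
      rw [PySem.Int.le_floordiv_iff_mul_le (by omega)]; omega
    omega
  · have h2 : PySem.Int.floordiv (lo + hi + 1) 2 < hi + 1 := by
      rw [PySem.Int.floordiv_lt_iff_lt_mul (by omega)]; omega
    omega


def findSelectedText_alt (html : String) (selection : String) : String :=
  let h := html.toList
  let s := selection.toList
  if PySem.Chars.isIn s h then selection
  else
    let n : Int := s.length
    let k := maxTrue (fun m => PySem.Chars.isIn (PySem.List.slice s none (some m)) h) 0 n
    let j := maxTrue (fun m => PySem.Chars.isIn (PySem.List.slice s (some (n - m)) none) h) 0 n
    let start := PySem.Chars.find h (PySem.List.slice s none (some k))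
    let suffix := PySem.List.slice s (some (n - j)) none
    let «end» := PySem.Chars.find h suffix + (suffix.length : Int)
    String.ofList (PySem.List.slice h (some start) (some «end»))


-- ===== PRECONDITION & SPEC =====
def Spec_findSelectedText (html : String) (selection : String) (out : String) : Prop := out = findSelectedText_alt html selection
instance (html : String) (selection : String) (out : String) : Decidable (Spec_findSelectedText html selection out) := by unfold Spec_findSelectedText; infer_instance

-- ===== CLAIM (what is proved, stated in full; the proofs are below) =====
def Claim_equal_findSelectedText : Prop := ∀ (html : String) (selection : String), Dom_findSelectedText html selection → Spec_findSelectedText html selection (findSelectedText html selection)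

-- ===== LEMMAS AND PROOFS =====
lemma isIn_take_mono (h s : List Char) {j k : Nat} (hjk : j ≤ k)
    (hk : PySem.Chars.isIn (s.take k) h = true) : PySem.Chars.isIn (s.take j) h = true := by
  rw [PySem.Chars.isIn_iff_infix] at *
  refine List.IsInfix.trans ?_ hk
  have he : s.take j = (s.take k).take j := by rw [List.take_take]; congr 1; omega
  rw [he]
  exact (List.take_prefix j (s.take k)).isInfix

lemma isIn_drop_mono (h s : List Char) {j k : Nat} (hjk : j ≤ k) (hkn : k ≤ s.length)
    (hk : PySem.Chars.isIn (s.drop (s.length - k)) h = true) :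
    PySem.Chars.isIn (s.drop (s.length - j)) h = true := by
  rw [PySem.Chars.isIn_iff_infix] at *
  refine List.IsInfix.trans ?_ hk
  have he : s.drop (s.length - j) = (s.drop (s.length - k)).drop (k - j) := by
    rw [List.drop_drop]; congr 1; omega
  rw [he]
  exact (List.drop_suffix (k - j) (s.drop (s.length - k))).isInfix

lemma aPrefixLoop_take (h s : List Char) : ∀ m, m ≤ s.length →
    aPrefixLoop h (s.take m)
      = s.take (Nat.findGreatest (fun k => PySem.Chars.isIn (s.take k) h = true) m)
  | 0, _ => by
      rw [aPrefixLoop]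
      simp [PySem.Chars.isIn_nil]
  | (m+1), hm => by
      rw [aPrefixLoop, Nat.findGreatest_succ]
      by_cases hin : PySem.Chars.isIn (s.take (m+1)) h = true
      · rw [if_pos hin, if_pos hin]
      · rw [if_neg hin, if_neg hin]
        have hd : (s.take (m+1)).dropLast = s.take m := by
          rw [List.dropLast_eq_take, List.take_take, List.length_take]
          congr 1; omega
        rw [hd]
        exact aPrefixLoop_take h s m (by omega)

lemma aSuffixLoop_drop (h s : List Char) : ∀ m, m ≤ s.length →
    aSuffixLoop h (s.drop (s.length - m))
      = s.drop (s.length - Nat.findGreatest (fun k => PySem.Chars.isIn (s.drop (s.length - k)) h = true) m)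
  | 0, _ => by
      rw [aSuffixLoop]
      simp [List.drop_length, PySem.Chars.isIn_nil]
  | (m+1), hm => by
      rw [aSuffixLoop, Nat.findGreatest_succ]
      by_cases hin : PySem.Chars.isIn (s.drop (s.length - (m+1))) h = true
      · rw [if_pos hin, if_pos hin]
      · rw [if_neg hin, if_neg hin]
        have hd : (s.drop (s.length - (m+1))).tail = s.drop (s.length - m) := by
          rw [List.tail_drop]; congr 1; omega
        rw [hd]
        exact aSuffixLoop_drop h s m (by omega)

lemma maxTrue_eq (pred : Int → Bool) (P : Nat → Bool) (n : Nat)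
    (hc : ∀ m : Int, 0 ≤ m → m ≤ (n:Int) → pred m = P m.toNat)
    (mono : ∀ j k : Nat, j ≤ k → k ≤ n → P k = true → P j = true) :
    ∀ lo hi : Int, 0 ≤ lo → lo ≤ hi → hi ≤ (n:Int) → P lo.toNat = true →
    (∀ k : Nat, (hi:Int) < (k:Int) → k ≤ n → P k = false) →
    maxTrue pred lo hi = (Nat.findGreatest (fun k => P k = true) n : Int) := by
  intro lo hi
  induction lo, hi using maxTrue.induct pred with
  | case1 lo hi hlt mid hpred ih =>
      intro h0 hlh hhn hPlo hup
      rw [maxTrue]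
      simp only [if_pos hlt]
      rw [if_pos hpred]
      have hmlo : lo + 1 ≤ PySem.Int.floordiv (lo + hi + 1) 2 := by
        rw [PySem.Int.le_floordiv_iff_mul_le (by omega)]; omega
      have hmhi : PySem.Int.floordiv (lo + hi + 1) 2 < hi + 1 := by
        rw [PySem.Int.floordiv_lt_iff_lt_mul (by omega)]; omega
      refine ih (by omega) (by omega) (by omega) ?_ hup
      rw [← hc _ (by omega) (by omega)]
      exact hpred
  | case2 lo hi hlt mid hpred ih =>
      intro h0 hlh hhn hPlo hup
      rw [maxTrue]
      simp only [if_pos hlt]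
      rw [if_neg hpred]
      have hmlo : lo + 1 ≤ PySem.Int.floordiv (lo + hi + 1) 2 := by
        rw [PySem.Int.le_floordiv_iff_mul_le (by omega)]; omega
      have hmhi : PySem.Int.floordiv (lo + hi + 1) 2 < hi + 1 := by
        rw [PySem.Int.floordiv_lt_iff_lt_mul (by omega)]; omega
      have hPmid : P (PySem.Int.floordiv (lo + hi + 1) 2).toNat = false := by
        rw [← hc _ (by omega) (by omega)]
        exact Bool.eq_false_iff.mpr hpred
      refine ih (by omega) (by omega) (by omega) hPlo ?_
      intro k hk1 hk2
      by_contra hkk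
      have hPk : P k = true := by simpa using hkk
      have := mono (PySem.Int.floordiv (lo + hi + 1) 2).toNat k (by omega) hk2 hPk
      rw [hPmid] at this
      exact absurd this (by simp)
  | case3 lo hi hlt =>
      intro h0 hlh hhn hPlo hup
      rw [maxTrue, if_neg hlt]
      have heq : lo = hi := by omega
      have : Nat.findGreatest (fun k => P k = true) n = lo.toNat := by
        rw [Nat.findGreatest_eq_iff]
        refine ⟨by omega, fun _ => hPlo, ?_⟩
        intro k hk1 hk2
        have := hup k (by omega) hk2
        simp [this]
      rw [this]
      omega


theorem findSelectedText_main_eq (html selection : String) :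
    findSelectedText html selection = findSelectedText_alt html selection := by
  unfold findSelectedText findSelectedText_alt
  set h := html.toList with hh
  set s := selection.toList with hs
  by_cases hin : PySem.Chars.isIn s h = true
  · simp only [hin, if_true]
  · simp only [hin, Bool.false_eq_true, if_false]
    set G1 := Nat.findGreatest (fun k => PySem.Chars.isIn (s.take k) h = true) s.length with hG1
    set G2 := Nat.findGreatest (fun k => PySem.Chars.isIn (s.drop (s.length - k)) h = true) s.length with hG2
    have hA1 : aPrefixLoop h s = s.take G1 := by
      conv_lhs => rw [← List.take_length (l := s)]
      exact aPrefixLoop_take h s s.length le_rfl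
    have hA2 : aSuffixLoop h s = s.drop (s.length - G2) := by
      conv_lhs => rw [show s = s.drop (s.length - s.length) by simp]
      exact aSuffixLoop_drop h s s.length le_rfl
    have hB1 : maxTrue (fun m => PySem.Chars.isIn (PySem.List.slice s none (some m)) h) 0 (s.length : Int) = (G1 : Int) := by
      refine maxTrue_eq _ (fun k => PySem.Chars.isIn (s.take k) h) s.length ?_ ?_ 0 (s.length : Int) le_rfl (by omega) le_rfl ?_ ?_
      · intro m h0 _
        rw [PySem.List.slice_to s h0]
      · exact fun j k hjk _ hk => isIn_take_mono h s hjk hk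
      · simp [PySem.Chars.isIn_nil]
      · intro k hk1 hk2; exfalso; omega
    have hB2 : maxTrue (fun m => PySem.Chars.isIn (PySem.List.slice s (some ((s.length : Int) - m)) none) h) 0 (s.length : Int) = (G2 : Int) := by
      refine maxTrue_eq _ (fun k => PySem.Chars.isIn (s.drop (s.length - k)) h) s.length ?_ ?_ 0 (s.length : Int) le_rfl (by omega) le_rfl ?_ ?_
      · intro m h0 hmn
        rw [PySem.List.slice_from s (by omega)]
        congr 2
        omega
      · exact fun j k hjk hkn hk => isIn_drop_mono h s hjk hkn hk
      · simp [List.drop_length, PySem.Chars.isIn_nil]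
      · intro k hk1 hk2; exfalso; omega
    rw [hB1, hB2, hA1, hA2]
    have hG2le : G2 ≤ s.length := Nat.findGreatest_le s.length
    have hcast : (s.length : Int) - (G2 : Int) = ((s.length - G2 : Nat) : Int) := by omega
    rw [hcast, PySem.List.slice_to_natCast, PySem.List.slice_from_natCast]

-- ===== VERDICT (by name: the statement is the Claim_ definition above) =====
theorem findSelectedText_spec : Claim_equal_findSelectedText := by
  intro html selection _
  unfold Spec_findSelectedText
  exact findSelectedText_main_eq html selection
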